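-- pv_equiv track=rewrite | github.com/nathanlct/probabilistic-parser | old_system/main_old.py | remove_functional_labels
-- ===== SOURCE A (Python) =====
-- def remove_functional_labels(s):
--     out = ''
--     remove = 0
--     for c in s:
--         if c == ' ':
--             remove = 0
--         elif c == '(':
--             remove = 1
--         elif remove == 1 and c == '-':
--             remove = 2
--         if remove == 2:
--             continue
--         out += c
--     return out
-- ===== SOURCE B (Python) =====
-- def remove_functional_labels(s):
--     # split at '(' and fix each piece that follows a '(': drop from the
--     # first '-' of the leading token up to the token's end (next space)
--     parts = s.split('(')
--     fixed = [parts[0]]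
--     for p in parts[1:]:
--         k = p.find(' ')
--         token = p if k == -1 else p[:k]
--         d = token.find('-')
--         if d != -1:
--             p = token[:d] + ('' if k == -1 else p[k:])
--         fixed.append(p)
--     return '('.join(fixed)
-- ===== Notes on version B (the rewrite author's own statement) =====
-- stated objective: faster
-- what changed: Replaced the per-character state-machine loop (the 'remove' mode variable) with a split-on-left-parenthesis / fix-each-piece / join pipeline: each piece after a split point has its leading token truncated at its first hyphen, using str.split/find/slicing instead of per-character tracked state.
import Mathlib
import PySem

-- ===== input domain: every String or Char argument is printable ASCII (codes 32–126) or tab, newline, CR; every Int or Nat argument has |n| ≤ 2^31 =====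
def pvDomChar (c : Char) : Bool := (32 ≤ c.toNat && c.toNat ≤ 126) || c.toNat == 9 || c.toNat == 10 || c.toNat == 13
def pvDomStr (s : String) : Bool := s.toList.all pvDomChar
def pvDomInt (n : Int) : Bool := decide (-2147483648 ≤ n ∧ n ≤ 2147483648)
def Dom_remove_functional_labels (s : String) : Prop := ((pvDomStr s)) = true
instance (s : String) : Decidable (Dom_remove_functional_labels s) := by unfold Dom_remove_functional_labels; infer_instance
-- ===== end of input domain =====

-- B replaces A's per-character state machine by a split-on-'(' / fix-each-piece / join pipeline (same O(n), measurably faster in CPython).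

-- ===== PORT A =====
-- the update of A's 'remove' state variable for one character
def pvStep (r : Int) (c : Char) : Int :=
  if c = ' ' then 0 else if c = '(' then 1 else if r = 1 ∧ c = '-' then 2 else r

def remove_functional_labels (s : String) : String :=
  String.ofList
    (s.toList.foldl
      (fun (st : List Char × Int) c =>
        let remove := pvStep st.2 c
        if remove = 2 then (st.1, remove) else (st.1 ++ [c], remove))
      ([], 0)).1

-- ===== PORT B =====
-- Source B's per-piece fix: truncate the piece's leading token (up to the first space) at its first '-'
def pvFixPiece (p : List Char) : List Char :=
  let k := PySem.Chars.find p [' ']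
  let token := if k = -1 then p else PySem.List.slice p none (some k)
  let d := PySem.Chars.find token ['-']
  if d ≠ -1 then
    PySem.List.slice token none (some d) ++ (if k = -1 then [] else PySem.List.slice p (some k) none)
  else p

def remove_functional_labels_alt (s : String) : String :=
  let parts := PySem.Chars.splitOn s.toList ['(']
  let fixed := match parts with
    | [] => []                       -- unreachable: split always yields at least one piece
    | p0 :: rest => p0 :: rest.map pvFixPiece
  String.ofList (PySem.Chars.join ['('] fixed)

-- ===== PRECONDITION & SPEC =====
def Spec_remove_functional_labels (s : String) (out : String) : Prop := out = remove_functional_labels_alt s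
instance (s : String) (out : String) : Decidable (Spec_remove_functional_labels s out) := by unfold Spec_remove_functional_labels; infer_instance

-- ===== CLAIM (what is proved, stated in full; the proofs are below) =====
def Claim_equal_remove_functional_labels : Prop := ∀ (s : String), Dom_remove_functional_labels s → Spec_remove_functional_labels s (remove_functional_labels s)

-- ===== LEMMAS AND PROOFS =====

-- A's state machine as a pure recursion on the character list
def pvMach (r : Int) : List Char → List Char
  | [] => []
  | c :: t => if pvStep r c = 2 then pvMach (pvStep r c) t else c :: pvMach (pvStep r c) t

-- output and final state of the machine on a chunk
def pvRun (r : Int) : List Char → List Char × Int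
  | [] => ([], r)
  | c :: t =>
      let o := pvRun (pvStep r c) t
      (if pvStep r c = 2 then o.1 else c :: o.1, o.2)

-- pvFixPiece in takeWhile/dropWhile normal form
def pvNorm (p : List Char) : List Char :=
  if ' ' ∈ p then
    (if '-' ∈ p.takeWhile (fun c => c != ' ') then
      (p.takeWhile (fun c => c != ' ')).takeWhile (fun c => c != '-') ++ p.dropWhile (fun c => c != ' ')
    else p)
  else if '-' ∈ p then p.takeWhile (fun c => c != '-') else p

lemma pv_foldA (l : List Char) (out : List Char) (r : Int) :
    (l.foldl
      (fun (st : List Char × Int) c =>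
        let remove := pvStep st.2 c
        if remove = 2 then (st.1, remove) else (st.1 ++ [c], remove))
      (out, r)).1 = out ++ pvMach r l := by
  induction l generalizing out r with
  | nil => simp [pvMach]
  | cons c t ih =>
    simp only [List.foldl_cons, pvMach]
    by_cases h : pvStep r c = 2
    · simp [h, ih]
    · simp [h, ih]

lemma pv_findGo_singleton (c0 : Char) (p : List Char) (k : Nat) :
    PySem.Chars.find.go [c0] p k =
      if c0 ∈ p then ((k : Int) + (p.takeWhile (fun c => c != c0)).length) else -1 := by
  induction p generalizing k with
  | nil => simp [PySem.Chars.find.go]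
  | cons c t ih =>
    rw [PySem.Chars.find.go]
    by_cases h : c0 = c
    · subst h; simp [List.isPrefixOf]
    · have h1 : (c == c0) = false := by simp; exact fun e => h e.symm
      have h2 : [c0].isPrefixOf (c :: t) = false := by
        simp [List.isPrefixOf]; exact h
      simp only [h2, if_neg, Bool.false_eq_true, ih, List.takeWhile_cons, h1,
        List.mem_cons]
      by_cases hm : c0 ∈ t
      · simp [hm, bne, h1]
        push_cast; ring
      · simp [hm, h]

lemma pv_find_singleton (p : List Char) (c0 : Char) :
    PySem.Chars.find p [c0] =
      if c0 ∈ p then ((p.takeWhile (fun c => c != c0)).length : Int) else -1 := by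
  simp [PySem.Chars.find, pv_findGo_singleton]

lemma pv_take_len_takeWhile (p : List Char) (f : Char → Bool) :
    p.take (p.takeWhile f).length = p.takeWhile f :=
  (List.prefix_iff_eq_take.mp (List.takeWhile_prefix f)).symm

lemma pv_drop_len_takeWhile (p : List Char) (f : Char → Bool) :
    p.drop (p.takeWhile f).length = p.dropWhile f := by
  have h := List.drop_left (l₁ := p.takeWhile f) (l₂ := p.dropWhile f)
  rwa [List.takeWhile_append_dropWhile] at h

lemma pv_fixPiece_eq (p : List Char) : pvFixPiece p = pvNorm p := by
  unfold pvFixPiece pvNorm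
  by_cases hs : ' ' ∈ p
  · have hk : ((p.takeWhile (fun c => c != ' ')).length : Int) ≠ -1 := by omega
    simp only [pv_find_singleton, hs, if_true, if_neg hk, PySem.List.slice_to_natCast,
      PySem.List.slice_from_natCast, pv_take_len_takeWhile, pv_drop_len_takeWhile]
    by_cases hd : '-' ∈ p.takeWhile (fun c => c != ' ')
    · have hd' : (((p.takeWhile (fun c => c != ' ')).takeWhile (fun c => c != '-')).length : Int) ≠ -1 := by omega
      simp only [hd, if_true, if_pos hd', PySem.List.slice_to_natCast, pv_take_len_takeWhile]
    · simp [hd]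
  · simp only [pv_find_singleton, hs, if_false]
    by_cases hd : '-' ∈ p
    · have hd' : ((p.takeWhile (fun c => c != '-')).length : Int) ≠ -1 := by omega
      simp only [hd, if_true, if_pos rfl, if_pos hd', PySem.List.slice_to_natCast,
        pv_take_len_takeWhile]
      simp
    · simp [hd]

lemma pv_mach0 (l : List Char) (h : '(' ∉ l) : pvMach 0 l = l := by
  induction l with
  | nil => rfl
  | cons c t ih =>
    simp only [List.mem_cons, not_or] at h
    have hs : pvStep 0 c = 0 := by
      simp [pvStep]; intro _ e; exact h.1 e.symm
    simp [pvMach, hs, ih h.2]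

lemma pv_mach2 (l : List Char) (h : '(' ∉ l) :
    pvMach 2 l = l.dropWhile (fun c => c != ' ') := by
  induction l with
  | nil => rfl
  | cons c t ih =>
    simp only [List.mem_cons, not_or] at h
    by_cases hc : c = ' '
    · subst hc
      have hs : pvStep 2 ' ' = 0 := by simp [pvStep]
      simp [pvMach, hs, pv_mach0 t h.2, List.dropWhile_cons]
    · have hs : pvStep 2 c = 2 := by
        simp [pvStep, hc]; exact fun e => h.1 e.symm
      simp [pvMach, hs, ih h.2, List.dropWhile_cons, hc]

lemma pv_mach1 (l : List Char) (h : '(' ∉ l) : pvMach 1 l = pvNorm l := by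
  induction l with
  | nil => simp [pvMach, pvNorm]
  | cons c t ih =>
    simp only [List.mem_cons, not_or] at h
    by_cases hsp : c = ' '
    · subst hsp
      have hs0 : pvStep 1 ' ' = 0 := by simp [pvStep]
      simp [pvMach, hs0, pv_mach0 t h.2, pvNorm, List.takeWhile_cons]
    · by_cases hdash : c = '-'
      · subst hdash
        have hs2 : pvStep 1 '-' = 2 := by simp [pvStep]
        rw [pvMach]
        simp only [hs2, if_pos rfl]
        rw [pv_mach2 t h.2]
        by_cases hsm : ' ' ∈ t
        · have hsm' : ' ' ∈ '-' :: t := List.mem_cons_of_mem _ hsm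
          simp [pvNorm, hsm', List.takeWhile_cons, List.dropWhile_cons]
        · have hsm' : ' ' ∉ '-' :: t := by simp [List.mem_cons, hsm]
          have hdw : t.dropWhile (fun c => c != ' ') = [] := by
            rw [List.dropWhile_eq_nil_iff]
            intro x hx
            simp only [bne_iff_ne, ne_eq, decide_eq_true_eq]
            exact fun e => hsm (e ▸ hx)
          rw [hdw, pvNorm, if_neg hsm', if_pos (by simp : '-' ∈ '-' :: t)]
          simp
      · have hs1 : pvStep 1 c = 1 := by simp [pvStep, hsp, hdash]
        have hb1 : (c != ' ') = true := by simp [bne_iff_ne]; exact hsp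
        have hb2 : (c != '-') = true := by simp [bne_iff_ne]; exact hdash
        have hm1 : ¬ (' ' = c) := fun e => hsp e.symm
        have hm2 : ¬ ('-' = c) := fun e => hdash e.symm
        rw [pvMach]
        simp only [hs1, if_neg (by norm_num : ¬(1:Int) = 2)]
        rw [ih h.2]
        simp only [pvNorm, List.mem_cons, List.takeWhile_cons, List.dropWhile_cons,
          hb1, hb2, hm1, hm2, false_or, if_true]
        split_ifs with h1 h2 <;> simp

lemma pv_mach_eq_run (r : Int) (l : List Char) : pvMach r l = (pvRun r l).1 := by
  induction l generalizing r with
  | nil => rfl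
  | cons c t ih => simp [pvMach, pvRun, ih]

lemma pv_mach_append (r : Int) (p u : List Char) :
    pvMach r (p ++ u) = (pvRun r p).1 ++ pvMach (pvRun r p).2 u := by
  induction p generalizing r with
  | nil => simp [pvRun]
  | cons c t ih =>
    simp only [List.cons_append, pvMach, pvRun]
    split <;> simp [ih]

lemma pv_mach_paren (r : Int) (u : List Char) :
    pvMach r ('(' :: u) = '(' :: pvMach 1 u := by
  have hs : pvStep r '(' = 1 := by simp [pvStep]
  simp [pvMach, hs]


-- repeated splitting at '(' (the list-level meaning of s.split('('))
def pvSplit (l : List Char) : List (List Char) :=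
  if hmem : '(' ∈ l then
    l.takeWhile (fun c => c != '(') :: pvSplit ((l.dropWhile (fun c => c != '(')).tail)
  else [l]
termination_by l.length
decreasing_by
  have hne : l.dropWhile (fun c => c != '(') ≠ [] := by
    intro hnil
    have := List.dropWhile_eq_nil_iff.mp hnil '(' hmem
    simp at this
  have h1 : (l.dropWhile (fun c => c != '(')).length ≤ l.length := l.length_dropWhile_le _
  have h2 : 0 < (l.dropWhile (fun c => c != '(')).length := List.length_pos_iff.mpr hne
  simp only [List.length_tail]
  omega

lemma pvSplit_not_mem (l : List Char) (h : '(' ∉ l) : pvSplit l = [l] := by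
  rw [pvSplit, dif_neg h]

lemma pv_dropWhile_head (l : List Char) (c : Char) (u : List Char)
    (h : l.dropWhile (fun c => c != '(') = c :: u) : c = '(' := by
  have hne : l.dropWhile (fun c => c != '(') ≠ [] := by rw [h]; exact List.cons_ne_nil c u
  have h2 := List.head_dropWhile_not (fun c => c != '(') hne
  have h3 : (l.dropWhile (fun c => c != '(')).head hne = c := by
    simp [h]
  rw [h3] at h2
  simpa using h2

lemma pv_decomp (l : List Char) (hp : '(' ∈ l) :
    l = l.takeWhile (fun c => c != '(') ++ '(' :: (l.dropWhile (fun c => c != '(')).tail ∧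
    pvSplit l = l.takeWhile (fun c => c != '(') :: pvSplit ((l.dropWhile (fun c => c != '(')).tail) := by
  have hne : l.dropWhile (fun c => c != '(') ≠ [] := by
    intro hnil
    have := List.dropWhile_eq_nil_iff.mp hnil '(' hp
    simp at this
  constructor
  · cases hd : l.dropWhile (fun c => c != '(') with
    | nil => exact absurd hd hne
    | cons c u =>
      have hc := pv_dropWhile_head l c u hd
      subst hc
      conv_lhs => rw [← List.takeWhile_append_dropWhile (p := fun c => c != '(') (l := l)]
      rw [hd]
      simp
  · rw [pvSplit, dif_pos hp]

lemma pv_split_ne_nil (l : List Char) : pvSplit l ≠ [] := by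
  rw [pvSplit]; split <;> simp

lemma pvSplit_paren (rest : List Char) : pvSplit ('(' :: rest) = [] :: pvSplit rest := by
  rw [pvSplit, dif_pos (by simp)]
  simp

lemma pvSplit_cons_ne (c : Char) (rest : List Char) (hc : c ≠ '(') :
    pvSplit (c :: rest) =
      match pvSplit rest with
      | [] => [[c]]
      | h :: t => (c :: h) :: t := by
  have hb : (c != '(') = true := by simp [bne_iff_ne]; exact hc
  by_cases hp : '(' ∈ rest
  · have hp' : '(' ∈ c :: rest := List.mem_cons_of_mem _ hp
    rw [pvSplit, dif_pos hp']
    rw [(pv_decomp rest hp).2]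
    simp [List.takeWhile_cons, List.dropWhile_cons, hb]
  · have hp' : '(' ∉ c :: rest := by
      simp [List.mem_cons]
      exact ⟨fun e => hc e.symm, hp⟩
    rw [pvSplit_not_mem _ hp', pvSplit_not_mem _ hp]

lemma pv_splitGo (fuel : Nat) (l cur : List Char) (acc : List (List Char))
    (hf : l.length < fuel) :
    PySem.Chars.splitOn.go ['('] fuel l cur acc =
      acc.reverse ++
        (match pvSplit l with
         | [] => [cur.reverse]
         | h :: t => (cur.reverse ++ h) :: t) := by
  induction fuel generalizing l cur acc with
  | zero => omega
  | succ fuel ih =>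
    match l with
    | [] =>
      rw [PySem.Chars.splitOn.go]
      · rw [pvSplit_not_mem _ (by simp)]
        simp
      · omega
    | c :: rest =>
      rw [PySem.Chars.splitOn.go]
      by_cases hc : c = '('
      · subst hc
        have hpre : ['('].isPrefixOf ('(' :: rest) = true := by simp [List.isPrefixOf]
        rw [if_pos hpre]
        have hdrop : List.drop ['('].length ('(' :: rest) = rest := rfl
        rw [hdrop, ih rest [] (cur.reverse :: acc) (by simp at hf ⊢; omega)]
        rw [pvSplit_paren]
        rcases hsp : pvSplit rest with _ | ⟨h, t⟩
        · exact absurd hsp (pv_split_ne_nil rest)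
        · simp
      · have hpre : ['('].isPrefixOf (c :: rest) = false := by
          simp [List.isPrefixOf]; exact fun e => hc e.symm
        rw [if_neg (by simp [hpre])]
        rw [ih rest (c :: cur) acc (by simp at hf ⊢; omega)]
        rw [pvSplit_cons_ne c rest hc]
        rcases hsp : pvSplit rest with _ | ⟨h, t⟩
        · exact absurd hsp (pv_split_ne_nil rest)
        · simp

lemma pv_splitOn_eq (l : List Char) : PySem.Chars.splitOn l ['('] = pvSplit l := by
  rw [PySem.Chars.splitOn, pv_splitGo (l.length + 1) l [] [] (by omega)]
  rcases hsp : pvSplit l with _ | ⟨h, t⟩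
  · exact absurd hsp (pv_split_ne_nil l)
  · simp

lemma pv_join_cons (a : List Char) (ls : List (List Char)) (h : ls ≠ []) :
    PySem.Chars.join ['('] (a :: ls) = a ++ '(' :: PySem.Chars.join ['('] ls := by
  match ls with
  | [] => exact absurd rfl h
  | b :: t => simp [PySem.Chars.join, List.intercalate, List.intersperse]

lemma pv_takeWhile_no_paren (l : List Char) : '(' ∉ l.takeWhile (fun c => c != '(') := by
  intro hmem
  have := List.mem_takeWhile_imp hmem
  simp at this

lemma pv_S1 : ∀ (n : Nat) (l : List Char), l.length ≤ n →
    pvMach 1 l = PySem.Chars.join ['('] ((pvSplit l).map pvFixPiece) := by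
  intro n
  induction n with
  | zero =>
    intro l hl
    have : l = [] := List.eq_nil_of_length_eq_zero (by omega)
    subst this
    rw [pvSplit_not_mem _ (by simp)]
    simp [pvMach, PySem.Chars.join, List.intercalate, pv_fixPiece_eq, pvNorm]
  | succ n ih =>
    intro l hl
    by_cases hp : '(' ∈ l
    · obtain ⟨hdec, hsp⟩ := pv_decomp l hp
      set t := l.takeWhile (fun c => c != '(') with ht
      set u := (l.dropWhile (fun c => c != '(')).tail with hu
      have hnt : '(' ∉ t := pv_takeWhile_no_paren l
      have hlen : u.length ≤ n := by
        have := congrArg List.length hdec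
        simp at this
        omega
      rw [hsp]
      calc pvMach 1 l = pvMach 1 (t ++ '(' :: u) := by rw [← hdec]
        _ = (pvRun 1 t).1 ++ pvMach (pvRun 1 t).2 ('(' :: u) := pv_mach_append 1 t ('(' :: u)
        _ = pvMach 1 t ++ '(' :: pvMach 1 u := by
              rw [pv_mach_paren, ← pv_mach_eq_run]
        _ = pvFixPiece t ++ '(' :: PySem.Chars.join ['('] ((pvSplit u).map pvFixPiece) := by
              rw [pv_mach1 t hnt, ← pv_fixPiece_eq, ih u hlen]
      rw [List.map_cons, pv_join_cons _ _ (by simpa using pv_split_ne_nil u)]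
    · rw [pvSplit_not_mem _ hp]
      simp [PySem.Chars.join, List.intercalate]
      rw [pv_mach1 l hp, ← pv_fixPiece_eq]

lemma pv_S0 (l : List Char) :
    pvMach 0 l =
      PySem.Chars.join ['(']
        (match pvSplit l with
         | [] => []
         | p0 :: rest => p0 :: rest.map pvFixPiece) := by
  by_cases hp : '(' ∈ l
  · obtain ⟨hdec, hsp⟩ := pv_decomp l hp
    set t := l.takeWhile (fun c => c != '(') with ht
    set u := (l.dropWhile (fun c => c != '(')).tail with hu
    have hnt : '(' ∉ t := pv_takeWhile_no_paren l
    rw [hsp]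
    have hmain : pvMach 0 l = t ++ '(' :: pvMach 1 u := by
      calc pvMach 0 l = pvMach 0 (t ++ '(' :: u) := by rw [← hdec]
        _ = (pvRun 0 t).1 ++ pvMach (pvRun 0 t).2 ('(' :: u) := pv_mach_append 0 t ('(' :: u)
        _ = pvMach 0 t ++ '(' :: pvMach 1 u := by rw [pv_mach_paren, ← pv_mach_eq_run]
        _ = t ++ '(' :: pvMach 1 u := by rw [pv_mach0 t hnt]
    rw [hmain, pv_S1 u.length u le_rfl]
    rw [pv_join_cons _ _ (by simpa using pv_split_ne_nil u)]
  · rw [pvSplit_not_mem _ hp]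
    simp [PySem.Chars.join, List.intercalate]
    exact pv_mach0 l hp

-- ===== VERDICT (by name: the statement is the Claim_ definition above) =====
theorem remove_functional_labels_spec : Claim_equal_remove_functional_labels := by
  intro s _
  unfold Spec_remove_functional_labels remove_functional_labels remove_functional_labels_alt
  rw [pv_foldA, pv_splitOn_eq, pv_S0]
  rfl
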